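-- pv_equiv track=rewrite | github.com/gesellkammer/maelzel | maelzel/core/tools.py | enharmonic
-- ===== SOURCE A (Python) =====
-- _enharmonic_sharp_to_flat = {
--     'C#': 'Db',
--     'D#': 'Eb',
--     'E#': 'F',
--     'F#': 'Gb',
--     'G#': 'Ab',
--     'A#': 'Bb',
--     'H#': 'C'
-- }
--
-- _enharmonic_flat_to_sharp = {
--     'Cb': 'H',
--     'Db': 'C#',
--     'Eb': 'D#',
--     'Fb': 'E',
--     'Gb': 'F#',
--     'Ab': 'G#',
--     'Bb': 'A#',
--     'Hb': 'A#'
-- }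
--
-- def enharmonic(n:str) -> str:
--     n = n.capitalize()
--     if "#" in n:
--         return _enharmonic_sharp_to_flat[n]
--     elif "x" in n:
--         return enharmonic(n.replace("x", "#"))
--     elif "is" in n:
--         return enharmonic(n.replace("is", "#"))
--     elif "b" in n:
--         return _enharmonic_flat_to_sharp[n]
--     elif "s" in n:
--         return enharmonic(n.replace("s", "b"))
--     elif "es" in n:
--         return enharmonic(n.replace("es", "b"))
--     else:
--         return n
-- ===== SOURCE B (Python) =====
-- # Table-driven re-implementation: one precomputed dict of every spelled form
-- # (Y#, Yx, Yis, Yb, Ys) -> enharmonic name, single lookup, no recursion.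
-- _ENHARMONIC = {
--     'C#': 'Db', 'Cx': 'Db', 'Cis': 'Db',
--     'D#': 'Eb', 'Dx': 'Eb', 'Dis': 'Eb',
--     'E#': 'F',  'Ex': 'F',  'Eis': 'F',
--     'F#': 'Gb', 'Fx': 'Gb', 'Fis': 'Gb',
--     'G#': 'Ab', 'Gx': 'Ab', 'Gis': 'Ab',
--     'A#': 'Bb', 'Ax': 'Bb', 'Ais': 'Bb',
--     'H#': 'C',  'Hx': 'C',  'His': 'C',
--     'Cb': 'H',  'Cs': 'H',
--     'Db': 'C#', 'Ds': 'C#',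
--     'Eb': 'D#', 'Es': 'D#',
--     'Fb': 'E',  'Fs': 'E',
--     'Gb': 'F#', 'Gs': 'F#',
--     'Ab': 'G#', 'As': 'G#',
--     'Bb': 'A#', 'Bs': 'A#',
--     'Hb': 'A#', 'Hs': 'A#',
-- }
--
-- def enharmonic(n: str) -> str:
--     n = n.capitalize()
--     return _ENHARMONIC.get(n, n)
-- ===== Notes on version B (the rewrite author's own statement) =====
-- stated objective: simpler
-- what changed: Replaces A's recursive chain of capitalize/replace rewrites and two separate dicts by a single precomputed 37-entry table of every spelled form with one lookup (default: the capitalized name); Pre_ excludes exactly the inputs on which A raises KeyError.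
-- outside the precondition, e.g. on enharmonic('Bis'): A raises KeyError, B returns 'Bis'; on enharmonic('#'): A raises KeyError, B returns '#'
import Mathlib
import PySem

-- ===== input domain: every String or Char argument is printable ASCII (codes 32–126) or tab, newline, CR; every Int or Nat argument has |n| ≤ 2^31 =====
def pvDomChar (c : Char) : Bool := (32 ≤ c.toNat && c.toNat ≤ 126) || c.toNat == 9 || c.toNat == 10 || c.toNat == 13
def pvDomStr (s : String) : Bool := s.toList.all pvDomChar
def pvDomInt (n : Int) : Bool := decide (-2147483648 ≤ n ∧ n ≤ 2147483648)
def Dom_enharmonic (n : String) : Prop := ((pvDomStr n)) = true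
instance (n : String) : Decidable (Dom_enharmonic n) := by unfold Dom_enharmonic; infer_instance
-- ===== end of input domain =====

set_option maxRecDepth 4000


-- B replaces A's recursive capitalize/replace rewriting with one precomputed table of all
-- spelled forms and a single lookup (objective: simpler).

-- shared helper: Python str.capitalize() — first char upper-cased, rest lower-cased; exact on the ASCII domain
def pyCapitalize (s : String) : String :=
  match s.toList with
  | [] => ""
  | c :: cs => String.ofList (c.toUpper :: PySem.Chars.lower cs)

-- ===== PORT A =====
def sharpToFlat : PySem.Dict String String :=
  PySem.Dict.ofList [("C#", "Db"), ("D#", "Eb"), ("E#", "F"), ("F#", "Gb"),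
                     ("G#", "Ab"), ("A#", "Bb"), ("H#", "C")]

def flatToSharp : PySem.Dict String String :=
  PySem.Dict.ofList [("Cb", "H"), ("Db", "C#"), ("Eb", "D#"), ("Fb", "E"),
                     ("Gb", "F#"), ("Ab", "G#"), ("Bb", "A#"), ("Hb", "A#")]

-- A's recursion, made total with a fuel guard; the dict-indexing `[n]` raises KeyError on a
-- missing key (get? = none) — those inputs are excluded by Pre_enharmonic, `getD ""` there.
def enharmonicGo (fuel : Nat) (n : String) : String :=
  match fuel with
  | 0 => ""
  | fuel' + 1 =>
    let m := pyCapitalize n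
    if PySem.Str.isIn "#" m then (sharpToFlat.get? m).getD ""
    else if PySem.Str.isIn "x" m then enharmonicGo fuel' (PySem.Str.replace m "x" "#")
    else if PySem.Str.isIn "is" m then enharmonicGo fuel' (PySem.Str.replace m "is" "#")
    else if PySem.Str.isIn "b" m then (flatToSharp.get? m).getD ""
    else if PySem.Str.isIn "s" m then enharmonicGo fuel' (PySem.Str.replace m "s" "b")
    else if PySem.Str.isIn "es" m then enharmonicGo fuel' (PySem.Str.replace m "es" "b")
    else m

-- every rewrite branch produces a string whose next call hits a lookup branch, so the call
-- chain has length at most 2 and fuel 2 is never exhausted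
def enharmonic (n : String) : String := enharmonicGo 2 n

-- ===== PORT B =====
def enhTable : PySem.Dict String String :=
  PySem.Dict.ofList
    [("C#", "Db"), ("Cx", "Db"), ("Cis", "Db"),
     ("D#", "Eb"), ("Dx", "Eb"), ("Dis", "Eb"),
     ("E#", "F"),  ("Ex", "F"),  ("Eis", "F"),
     ("F#", "Gb"), ("Fx", "Gb"), ("Fis", "Gb"),
     ("G#", "Ab"), ("Gx", "Ab"), ("Gis", "Ab"),
     ("A#", "Bb"), ("Ax", "Bb"), ("Ais", "Bb"),
     ("H#", "C"),  ("Hx", "C"),  ("His", "C"),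
     ("Cb", "H"),  ("Cs", "H"),
     ("Db", "C#"), ("Ds", "C#"),
     ("Eb", "D#"), ("Es", "D#"),
     ("Fb", "E"),  ("Fs", "E"),
     ("Gb", "F#"), ("Gs", "F#"),
     ("Ab", "G#"), ("As", "G#"),
     ("Bb", "A#"), ("Bs", "A#"),
     ("Hb", "A#"), ("Hs", "A#")]

def enharmonic_alt (n : String) : String :=
  let m := pyCapitalize n
  enhTable.getD m m

-- ===== PRECONDITION & SPEC =====
-- Pre_ excludes exactly the inputs on which A raises KeyError: those whose capitalized form
-- contains a hash, x, b or s character yet is not one of the 37 recognized spellings.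
def Pre_enharmonic (n : String) : Prop :=
  pyCapitalize n ∈
    ["C#", "Cx", "Cis", "D#", "Dx", "Dis", "E#", "Ex", "Eis", "F#", "Fx", "Fis",
     "G#", "Gx", "Gis", "A#", "Ax", "Ais", "H#", "Hx", "His",
     "Cb", "Cs", "Db", "Ds", "Eb", "Es", "Fb", "Fs", "Gb", "Gs", "Ab", "As",
     "Bb", "Bs", "Hb", "Hs"] ∨
  (PySem.Str.isIn "#" (pyCapitalize n) = false ∧ PySem.Str.isIn "x" (pyCapitalize n) = false ∧
   PySem.Str.isIn "b" (pyCapitalize n) = false ∧ PySem.Str.isIn "s" (pyCapitalize n) = false)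

instance (n : String) : Decidable (Pre_enharmonic n) := by unfold Pre_enharmonic; infer_instance

def pvWitness_enharmonic : String := "Cis"

def Spec_enharmonic (n : String) (out : String) : Prop := out = enharmonic_alt n
instance (n : String) (out : String) : Decidable (Spec_enharmonic n out) := by unfold Spec_enharmonic; infer_instance

-- ===== CLAIM (what is proved, stated in full; the proofs are below) =====
def Claim_equal_enharmonic : Prop := ∀ (n : String), Dom_enharmonic n → Pre_enharmonic n → Spec_enharmonic n (enharmonic n)

-- ===== LEMMAS AND PROOFS =====

theorem enharmonicGo_succ (f : Nat) (n : String) :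
    enharmonicGo (f + 1) n =
    (let m := pyCapitalize n
     if PySem.Str.isIn "#" m then (sharpToFlat.get? m).getD ""
     else if PySem.Str.isIn "x" m then enharmonicGo f (PySem.Str.replace m "x" "#")
     else if PySem.Str.isIn "is" m then enharmonicGo f (PySem.Str.replace m "is" "#")
     else if PySem.Str.isIn "b" m then (flatToSharp.get? m).getD ""
     else if PySem.Str.isIn "s" m then enharmonicGo f (PySem.Str.replace m "s" "b")
     else if PySem.Str.isIn "es" m then enharmonicGo f (PySem.Str.replace m "es" "b")
     else m) := rfl

-- pattern containment transfers to any string that contains the pattern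
theorem isIn_false_of_sub (p q m : String) (hpq : p.toList <:+: q.toList)
    (hp : PySem.Str.isIn p m = false) : PySem.Str.isIn q m = false := by
  cases hq : PySem.Str.isIn q m with
  | false => rfl
  | true =>
    have hinf := (PySem.Str.isIn_iff_infix q m).mp hq
    have := (PySem.Str.isIn_iff_infix p m).mpr (hpq.trans hinf)
    rw [hp] at this
    exact absurd this (by simp)

-- ===== VERDICT (by name: the statement is the Claim_ definition above) =====
theorem enharmonic_spec : Claim_equal_enharmonic := by
  intro n _ hpre
  unfold Spec_enharmonic enharmonic enharmonic_alt
  rcases hpre with hk | ⟨h1, h2, h3, h4⟩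
  · simp only [List.mem_cons, List.not_mem_nil, or_false] at hk
    rcases hk with h|h|h|h|h|h|h|h|h|h|h|h|h|h|h|h|h|h|h|h|h|h|h|h|h|h|h|h|h|h|h|h|h|h|h|h|h <;>
      rw [show (2 : Nat) = 1 + 1 from rfl, enharmonicGo_succ] <;> rw [h] <;> decide
  · have his : PySem.Str.isIn "is" (pyCapitalize n) = false :=
      isIn_false_of_sub "s" "is" _ (by decide) h4
    have hes : PySem.Str.isIn "es" (pyCapitalize n) = false :=
      isIn_false_of_sub "s" "es" _ (by decide) h4
    rw [show (2 : Nat) = 1 + 1 from rfl, enharmonicGo_succ]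
    simp only [h1, h2, h3, h4, his, hes, Bool.false_eq_true, if_false]
    have hkeys : enhTable.keys =
        ["C#", "Cx", "Cis", "D#", "Dx", "Dis", "E#", "Ex", "Eis", "F#", "Fx", "Fis",
         "G#", "Gx", "Gis", "A#", "Ax", "Ais", "H#", "Hx", "His",
         "Cb", "Cs", "Db", "Ds", "Eb", "Es", "Fb", "Fs", "Gb", "Gs", "Ab", "As",
         "Bb", "Bs", "Hb", "Hs"] := by decide
    have hnot : pyCapitalize n ∉ enhTable.keys := by
      rw [hkeys]
      intro hmem
      simp only [List.mem_cons, List.not_mem_nil, or_false] at hmem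
      rcases hmem with h|h|h|h|h|h|h|h|h|h|h|h|h|h|h|h|h|h|h|h|h|h|h|h|h|h|h|h|h|h|h|h|h|h|h|h|h <;>
        rw [h] at h1 h2 h3 h4 <;> revert h1 h2 h3 h4 <;> decide
    have hc : enhTable.contains (pyCapitalize n) = false := by
      rw [PySem.Dict.contains_eq_decide_mem_keys, decide_eq_false_iff_not]
      exact hnot
    rw [PySem.Dict.getD_of_not_contains _ _ hc]
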